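-- pv_equiv track=rewrite | github.com/hideonbush233-lucy/learning | 剑指Offer/JZ66-机器人的运动范围.py | func
-- ===== SOURCE A (Python) =====
-- def func(n,m):
--     res = 0
--     while n > 0:
--         res += (n%10)
--         n = n//10
--     while m > 0:
--         res += (m%10)
--         m = m//10
--     return res
-- ===== SOURCE B (Python) =====
-- def func(n, m):
--     total = 0
--     for x in (n, m):
--         if x > 0:
--             for c in str(x):
--                 total += ord(c) - 48
--     return total
-- ===== Notes on version B (the rewrite author's own statement) =====
-- stated objective: alternative
-- what changed: Replaces A's repeated %10///10 arithmetic loops on a mutable accumulator with a decimal-string pass that sums the character values of str(x) for each positive argument.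
import Mathlib
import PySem

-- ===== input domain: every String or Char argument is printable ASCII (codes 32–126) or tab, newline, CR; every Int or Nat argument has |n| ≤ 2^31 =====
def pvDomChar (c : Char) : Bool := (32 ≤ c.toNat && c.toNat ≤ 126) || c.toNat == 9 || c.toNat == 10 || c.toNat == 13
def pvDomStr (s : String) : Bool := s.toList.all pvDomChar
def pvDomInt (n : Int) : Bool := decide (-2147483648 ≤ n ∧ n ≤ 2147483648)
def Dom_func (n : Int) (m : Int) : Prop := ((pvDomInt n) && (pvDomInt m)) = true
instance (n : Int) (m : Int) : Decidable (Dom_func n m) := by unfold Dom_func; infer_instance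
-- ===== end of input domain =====

-- B replaces A's arithmetic while-loops (repeated %10 / //10 on a mutable accumulator)
-- with a decimal-string pass: for each positive argument it sums the digit values of
-- str(x) (alternative algorithm, same asymptotic cost).

-- ===== PORT A =====
-- 'while n > 0: res += n%10; n = n//10' as recursion over (n, res)
def funcLoop (n : Int) (res : Int) : Int :=
  if _h : n > 0 then
    funcLoop (PySem.Int.floordiv n 10) (res + PySem.Int.mod n 10)
  else res
termination_by n.toNat
decreasing_by
  have h1 : PySem.Int.floordiv n 10 = n / 10 :=
    PySem.Int.floordiv_eq_ediv_of_pos (by norm_num)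
  rw [h1]; omega

def func (n : Int) (m : Int) : Int :=
  funcLoop m (funcLoop n 0)

-- ===== PORT B =====
-- inner 'for c in str(x): total += ord(c) - 48'
def charDigitFold (cs : List Char) (total : Int) : Int :=
  cs.foldl (fun t c => t + ((c.toNat : Int) - 48)) total

def func_alt (n : Int) (m : Int) : Int :=
  [n, m].foldl
    (fun total x =>
      if x > 0 then charDigitFold (PySem.Int.toStr x).toList total else total)
    0

-- ===== PRECONDITION & SPEC =====
def Spec_func (n : Int) (m : Int) (out : Int) : Prop := out = func_alt n m
instance (n : Int) (m : Int) (out : Int) : Decidable (Spec_func n m out) := by unfold Spec_func; infer_instance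

-- ===== CLAIM (what is proved, stated in full; the proofs are below) =====
def Claim_equal_func : Prop := ∀ (n : Int) (m : Int), Dom_func n m → Spec_func n m (func n m)

-- ===== LEMMAS AND PROOFS =====

-- digit-char values of a character list, as an Int
def cvs (cs : List Char) : Int := (cs.map (fun c => ((c.toNat : Int) - 48))).sum

theorem charDigitFold_eq (cs : List Char) (total : Int) :
    charDigitFold cs total = total + cvs cs := by
  induction cs generalizing total with
  | nil => simp [charDigitFold, cvs]
  | cons c tl ih =>
    simp only [charDigitFold, cvs, List.foldl_cons, List.map_cons, List.sum_cons] at *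
    rw [ih]; ring

theorem digitChar_val (d : Nat) (hd : d < 10) :
    ((Nat.digitChar d).toNat : Int) - 48 = (d : Int) := by
  interval_cases d <;> decide

theorem cvs_toDigitsCore (f : Nat) : ∀ (n : Nat) (l : List Char), n < f →
    cvs (Nat.toDigitsCore 10 f n l) = ((Nat.digits 10 n).sum : Int) + cvs l := by
  induction f with
  | zero => intro n l h; omega
  | succ f ih =>
    intro n l h
    rw [Nat.toDigitsCore]
    by_cases hz : n / 10 = 0
    · have h10 : n < 10 := by omega
      simp only [hz, if_true]
      have hmod : n % 10 = n := Nat.mod_eq_of_lt h10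
      by_cases hn0 : n = 0
      · subst hn0; simp [cvs, Nat.digitChar]
      · rw [Nat.digits_def' (by norm_num : 1 < 10) (Nat.pos_of_ne_zero hn0)]
        simp only [cvs, List.map_cons, List.sum_cons, hz, Nat.digits_zero,
          List.sum_nil, Nat.add_zero]
        have := digitChar_val (n % 10) (Nat.mod_lt n (by norm_num))
        push_cast
        rw [hmod] at this ⊢
        rw [this]
        omega
    · simp only [hz, if_false]
      have hnpos : 0 < n := by
        rcases Nat.eq_zero_or_pos n with h0 | h0
        · subst h0; simp at hz
        · exact h0
      have hlt : n / 10 < f := by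
        have : n / 10 < n := Nat.div_lt_self hnpos (by norm_num)
        omega
      rw [ih (n / 10) _ hlt]
      rw [Nat.digits_def' (by norm_num : 1 < 10) hnpos]
      simp only [cvs, List.map_cons, List.sum_cons, List.sum_cons]
      have := digitChar_val (n % 10) (Nat.mod_lt n (by norm_num))
      push_cast
      rw [this]
      push_cast
      ring

theorem cvs_toChars_pos (x : Int) (hx : 0 < x) :
    cvs (PySem.Int.toChars x) = ((Nat.digits 10 x.toNat).sum : Int) := by
  unfold PySem.Int.toChars
  rw [if_neg (by omega : ¬ x < 0)]
  unfold Nat.toDigits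
  rw [cvs_toDigitsCore (x.toNat + 1) x.toNat [] (by omega)]
  simp [cvs]

theorem funcLoop_eq (n res : Int) :
    funcLoop n res = res + (if n > 0 then ((Nat.digits 10 n.toNat).sum : Int) else 0) := by
  induction n, res using funcLoop.induct with
  | case1 n res h ih =>
    rw [funcLoop, dif_pos h, ih]
    have hfd : PySem.Int.floordiv n 10 = n / 10 :=
      PySem.Int.floordiv_eq_ediv_of_pos (by norm_num)
    have hmd : PySem.Int.mod n 10 = n % 10 :=
      PySem.Int.mod_eq_emod_of_pos (by norm_num)
    have hrec : Nat.digits 10 n.toNat = n.toNat % 10 :: Nat.digits 10 (n.toNat / 10) :=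
      Nat.digits_def' (by norm_num : 1 < 10) (by omega)
    rw [hfd, hmd, if_pos h, hrec]
    by_cases hq : n / 10 > 0
    · rw [if_pos hq]
      have h1 : (n / 10).toNat = n.toNat / 10 := by omega
      rw [h1]
      simp only [List.sum_cons]
      push_cast
      omega
    · rw [if_neg hq]
      have hq0 : n.toNat / 10 = 0 := by omega
      rw [hq0]
      simp only [Nat.digits_zero, List.sum_cons, List.sum_nil]
      push_cast
      omega
  | case2 n res h =>
    rw [funcLoop]
    simp [dif_neg h, if_neg h]

theorem funcLoop_eq_cvs (n res : Int) :
    funcLoop n res =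
      res + (if n > 0 then cvs (PySem.Int.toStr n).toList else 0) := by
  rw [funcLoop_eq]
  by_cases hn : n > 0
  · rw [if_pos hn, if_pos hn, PySem.Int.toList_toStr, cvs_toChars_pos n hn]
  · rw [if_neg hn, if_neg hn]

-- ===== VERDICT (by name: the statement is the Claim_ definition above) =====
theorem func_spec : Claim_equal_func := by
  intro n m _
  unfold Spec_func func func_alt
  simp only [List.foldl_cons, List.foldl_nil]
  rw [funcLoop_eq_cvs, funcLoop_eq_cvs]
  by_cases hn : n > 0 <;> by_cases hm : m > 0 <;>
    simp [hn, hm, charDigitFold_eq]
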